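-- pv_equiv track=rewrite | github.com/johnmathews/sre-agent | src/report/generator.py | _aggregate_by_normalized_name
-- ===== SOURCE A (Python) =====
-- def _normalize_service_name(name: str) -> str:
--     """Normalize a service name so that e.g. 'node-exporter' and 'node_exporter' merge."""
--     return name.replace("-", "_")
--
-- def _aggregate_by_normalized_name(raw: dict[str, int]) -> dict[str, int]:
--     """Merge service counts whose names differ only by hyphens vs underscores.
--
--     Keeps the variant with the highest count as the canonical name.
--     """
--     # Group by normalized key
--     groups: dict[str, list[tuple[str, int]]] = {}
--     for name, count in raw.items():
--         key = _normalize_service_name(name)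
--         groups.setdefault(key, []).append((name, count))
--
--     merged: dict[str, int] = {}
--     for variants in groups.values():
--         # Pick the name with the highest count as canonical
--         canonical = max(variants, key=lambda x: x[1])[0]
--         merged[canonical] = sum(c for _, c in variants)
--     return merged
-- ===== SOURCE B (Python) =====
-- def _normalize_service_name(name: str) -> str:
--     return name.replace("-", "_")
--
-- def _aggregate_by_normalized_name(raw: dict[str, int]) -> dict[str, int]:
--     """Single pass: running sum and running canonical (name, best_count) per normalized key."""
--     sums: dict[str, int] = {}
--     canon: dict[str, tuple[str, int]] = {}
--     for name, count in raw.items():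
--         key = _normalize_service_name(name)
--         sums[key] = sums.get(key, 0) + count
--         if key not in canon or count > canon[key][1]:
--             canon[key] = (name, count)
--     return {canon[k][0]: sums[k] for k in sums}
-- ===== Notes on version B (the rewrite author's own statement) =====
-- stated objective: simpler
-- what changed: Replaces the group-lists-then-reduce two-phase algorithm (build a dict of variant lists, then a max pass and a sum pass over each list) with a single pass keeping a running sum and a running canonical (name, best_count) per normalized key, using strict '>' so ties keep the first-seen variant.
import Mathlib
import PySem

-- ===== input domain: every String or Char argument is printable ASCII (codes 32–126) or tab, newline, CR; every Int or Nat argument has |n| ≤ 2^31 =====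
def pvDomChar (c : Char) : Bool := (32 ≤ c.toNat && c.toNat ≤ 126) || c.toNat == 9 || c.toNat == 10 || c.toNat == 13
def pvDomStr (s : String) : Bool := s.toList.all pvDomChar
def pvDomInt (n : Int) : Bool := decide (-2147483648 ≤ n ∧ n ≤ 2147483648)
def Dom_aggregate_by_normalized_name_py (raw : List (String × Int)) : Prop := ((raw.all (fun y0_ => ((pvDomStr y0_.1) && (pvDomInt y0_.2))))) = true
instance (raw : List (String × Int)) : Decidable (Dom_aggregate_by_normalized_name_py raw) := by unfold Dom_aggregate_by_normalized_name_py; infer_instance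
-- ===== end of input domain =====

-- B replaces A's two-phase group-lists-then-max/sum with one pass keeping a running
-- sum and running canonical per normalized key (objective: simpler).

-- ===== PORT A =====
-- _normalize_service_name
def normalize_service_name_py (name : String) : String :=
  PySem.Str.replace name "-" "_"

def aggregate_by_normalized_name_py (raw : List (String × Int)) : List (String × Int) :=
  -- the Python parameter is a dict built from these pairs
  let d : PySem.Dict String Int := PySem.Dict.ofList raw
  -- groups: dict[str, list[tuple[str, int]]]; setdefault(key, []).append((name, count))
  let groups : PySem.Dict String (List (String × Int)) :=
    d.items.foldl (fun g p =>
      let key := normalize_service_name_py p.1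
      g.modify key [] (fun v => v ++ [p]))
      PySem.Dict.empty
  -- merged: canonical = max(variants, key=λx. x[1])[0]; max never raises here (groups are
  -- nonempty), so the .getD default is unreachable
  let merged : PySem.Dict String Int :=
    groups.values.foldl (fun m variants =>
      let canonical := ((PySem.List.max? variants (fun x => x.2)).getD ("", 0)).1
      m.insert canonical ((variants.map (fun x => x.2)).sum))
      PySem.Dict.empty
  merged.items

-- ===== PORT B =====
def aggregate_by_normalized_name_py_alt (raw : List (String × Int)) : List (String × Int) :=
  let d : PySem.Dict String Int := PySem.Dict.ofList raw
  let st :=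
    d.items.foldl
      (fun (st : PySem.Dict String Int × PySem.Dict String (String × Int)) p =>
        let key := normalize_service_name_py p.1
        -- sums[key] = sums.get(key, 0) + count
        let sums := st.1.insert key (st.1.getD key 0 + p.2)
        -- if key not in canon or count > canon[key][1]: canon[key] = (name, count)
        -- (Python's `or` short-circuits, so canon[key] is only read when present; getD's
        -- default is unreachable)
        let canon := if !st.2.contains key || decide ((st.2.getD key ("", 0)).2 < p.2)
                     then st.2.insert key (p.1, p.2) else st.2
        (sums, canon))
      (PySem.Dict.empty, PySem.Dict.empty)
  -- {canon[k][0]: sums[k] for k in sums}  (canon[k] always present; default unreachable)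
  (st.1.keys.foldl
    (fun m k => m.insert ((st.2.getD k ("", 0)).1) (st.1.getD k 0))
    PySem.Dict.empty).items

-- ===== PRECONDITION & SPEC =====
def Spec_aggregate_by_normalized_name_py (raw : List (String × Int)) (out : List (String × Int)) : Prop := out = aggregate_by_normalized_name_py_alt raw
instance (raw : List (String × Int)) (out : List (String × Int)) : Decidable (Spec_aggregate_by_normalized_name_py raw out) := by unfold Spec_aggregate_by_normalized_name_py; infer_instance

-- ===== CLAIM (what is proved, stated in full; the proofs are below) =====
def Claim_equal_aggregate_by_normalized_name_py : Prop := ∀ (raw : List (String × Int)), Dom_aggregate_by_normalized_name_py raw → Spec_aggregate_by_normalized_name_py raw (aggregate_by_normalized_name_py raw)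

-- ===== LEMMAS AND PROOFS =====

-- running-sum loop of B: getD after the fold is the old value plus the sum over the group
theorem pv_sums_getD (l : List (String × Int)) (d : PySem.Dict String Int) (k : String) :
    (l.foldl (fun d p => d.insert (normalize_service_name_py p.1)
        (d.getD (normalize_service_name_py p.1) 0 + p.2)) d).getD k 0
    = d.getD k 0
      + ((l.filter (fun p => normalize_service_name_py p.1 == k)).map (fun p => p.2)).sum := by
  induction l generalizing d with
  | nil => simp
  | cons p t ih =>
    simp only [List.foldl_cons, List.filter_cons, ih]
    by_cases h : normalize_service_name_py p.1 = k
    · simp only [h, beq_self_eq_true, if_true, List.map_cons, List.sum_cons,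
        PySem.Dict.getD_insert_self]
      ring
    · have hne : k ≠ normalize_service_name_py p.1 := fun hk => h hk.symm
      have hb : (normalize_service_name_py p.1 == k) = false := beq_eq_false_iff_ne.mpr h
      rw [hb, PySem.Dict.getD_insert_of_ne _ _ _ hne]
      simp

-- running-canonical loop of B: get? after the fold is the first-max fold over the group
theorem pv_canon_get? (l : List (String × Int)) (c : PySem.Dict String (String × Int))
    (k : String) :
    (l.foldl (fun c p =>
        if !c.contains (normalize_service_name_py p.1)
            || decide ((c.getD (normalize_service_name_py p.1) ("", 0)).2 < p.2)
        then c.insert (normalize_service_name_py p.1) (p.1, p.2) else c) c).get? k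
    = (l.filter (fun p => normalize_service_name_py p.1 == k)).foldl
        (fun acc p => match acc with
          | none => some p
          | some m => if m.2 < p.2 then some p else some m) (c.get? k) := by
  induction l generalizing c with
  | nil => rfl
  | cons p t ih =>
    simp only [List.foldl_cons, List.filter_cons]
    by_cases h : normalize_service_name_py p.1 = k
    · subst h
      simp only [beq_self_eq_true, if_true, List.foldl_cons]
      cases hg : c.get? (normalize_service_name_py p.1) with
      | none =>
        have hc : c.contains (normalize_service_name_py p.1) = false := by
          rw [PySem.Dict.contains_eq_isSome_get?, hg]; rfl
        rw [hc]
        simp only [Bool.not_false, Bool.true_or]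
        rw [if_pos trivial, ih, PySem.Dict.get?_insert_self]
      | some m =>
        have hc : c.contains (normalize_service_name_py p.1) = true := by
          rw [PySem.Dict.contains_eq_isSome_get?, hg]; rfl
        have hgd : c.getD (normalize_service_name_py p.1) ("", 0) = m :=
          PySem.Dict.getD_of_get?_eq_some c ("", 0) hg
        rw [hc, hgd]
        simp only [Bool.not_true, Bool.false_or]
        by_cases hlt : m.2 < p.2
        · rw [if_pos (by simp [hlt]), ih, PySem.Dict.get?_insert_self]
          simp [hlt]
        · rw [if_neg (by simp [hlt]), ih, hg]
          simp [hlt]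
    · have hne : k ≠ normalize_service_name_py p.1 := fun hk => h hk.symm
      have hb : (normalize_service_name_py p.1 == k) = false := beq_eq_false_iff_ne.mpr h
      rw [hb]
      simp only [Bool.false_eq_true, if_false]
      split
      · rw [ih, PySem.Dict.get?_insert_of_ne _ _ hne]
      · exact ih c

-- group-building loop of A: getD after the fold is the group (the sublist with this key)
theorem pv_groups_getD (l : List (String × Int))
    (d : PySem.Dict String (List (String × Int))) (k : String) :
    (l.foldl (fun g p => g.modify (normalize_service_name_py p.1) [] (fun v => v ++ [p])) d).getD k []
    = d.getD k [] ++ l.filter (fun p => normalize_service_name_py p.1 == k) := by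
  have h := PySem.Dict.getD_foldl_modify_append
    (l := l.map (fun p => (normalize_service_name_py p.1, p))) (d := d) (c := k)
  rw [List.foldl_map] at h
  rw [h, List.filter_map]
  simp [Function.comp_def]

-- ===== VERDICT (by name: the statement is the Claim_ definition above) =====
theorem aggregate_by_normalized_name_py_spec : Claim_equal_aggregate_by_normalized_name_py := by
  intro raw _
  unfold Spec_aggregate_by_normalized_name_py
  simp only [aggregate_by_normalized_name_py, aggregate_by_normalized_name_py_alt]
  set l := (PySem.Dict.ofList raw).items with hl
  set groups := l.foldl
      (fun g p => g.modify (normalize_service_name_py p.1) [] (fun v => v ++ [p]))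
      PySem.Dict.empty with hgroups
  set sums := l.foldl
      (fun d p => d.insert (normalize_service_name_py p.1)
        (PySem.Dict.getD d (normalize_service_name_py p.1) 0 + p.2))
      PySem.Dict.empty with hsums
  set canon := l.foldl
      (fun c p =>
        if !PySem.Dict.contains c (normalize_service_name_py p.1)
            || decide ((PySem.Dict.getD c (normalize_service_name_py p.1) ("", 0)).2 < p.2)
        then c.insert (normalize_service_name_py p.1) (p.1, p.2) else c)
      PySem.Dict.empty with hcanon
  have hst : l.foldl
      (fun (st : PySem.Dict String Int × PySem.Dict String (String × Int)) p =>
        (st.1.insert (normalize_service_name_py p.1)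
          (st.1.getD (normalize_service_name_py p.1) 0 + p.2),
         if !st.2.contains (normalize_service_name_py p.1)
             || decide ((st.2.getD (normalize_service_name_py p.1) ("", 0)).2 < p.2)
         then st.2.insert (normalize_service_name_py p.1) (p.1, p.2) else st.2))
      (PySem.Dict.empty, PySem.Dict.empty) = (sums, canon) :=
    PySem.List.foldl_prod_mk
      (f := fun (d : PySem.Dict String Int) (p : String × Int) =>
              d.insert (normalize_service_name_py p.1)
                (d.getD (normalize_service_name_py p.1) 0 + p.2))
      (g := fun (c : PySem.Dict String (String × Int)) (p : String × Int) =>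
              if !c.contains (normalize_service_name_py p.1)
                  || decide ((c.getD (normalize_service_name_py p.1) ("", 0)).2 < p.2)
              then c.insert (normalize_service_name_py p.1) (p.1, p.2) else c)
      l PySem.Dict.empty PySem.Dict.empty
  simp only [hst]
  have hnd : groups.keys.Nodup := by
    rw [hgroups]
    exact PySem.Dict.nodup_keys_foldl_modify_key _ _ _ _ _ PySem.Dict.nodup_keys_empty
  have hkeys : sums.keys = groups.keys := by
    rw [hsums, hgroups,
      PySem.Dict.keys_foldl_insert_key l (fun p => normalize_service_name_py p.1)
        (fun d p => PySem.Dict.getD d (normalize_service_name_py p.1) 0 + p.2) PySem.Dict.empty,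
      PySem.Dict.keys_foldl_modify_key l (fun p => normalize_service_name_py p.1)
        [] (fun g p v => v ++ [p]) PySem.Dict.empty]
    rfl
  congr 1
  rw [PySem.Dict.values_eq_map_keys groups hnd [], List.foldl_map, hkeys]
  apply PySem.List.foldl_congr_mem
  intro m k _
  have hG : groups.getD k [] = l.filter (fun p => normalize_service_name_py p.1 == k) := by
    rw [hgroups]
    simpa using pv_groups_getD l PySem.Dict.empty k
  have hS : sums.getD k 0
      = ((l.filter (fun p => normalize_service_name_py p.1 == k)).map (fun p => p.2)).sum := by
    rw [hsums]
    simpa using pv_sums_getD l PySem.Dict.empty k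
  have hC : canon.get? k
      = PySem.List.max? (l.filter (fun p => normalize_service_name_py p.1 == k))
          (fun x => x.2) := by
    rw [hcanon, pv_canon_get?, PySem.Dict.get?_empty]
    simp only [PySem.List.max?]
    congr 1
    funext acc p
    cases acc <;> rfl
  rw [hG, hS, PySem.Dict.getD_eq_get?_getD, hC]
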